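-- pv_equiv track=rewrite | github.com/map-A/TIMU | NCTest/1.py | solve
-- ===== SOURCE A (Python) =====
-- def solve(str1,str2):
--     kv = {};
--     for i in str1:
--         times = str2.count(i)
--         kv[i] = times
--     ret = ""
--     for i in str1:
--         if i in kv:
--             ret+=str(i)+":"+str(kv[i])+','
--             kv.pop(i)
--     return ret[0:-1]
-- ===== SOURCE B (Python) =====
-- def solve(str1, str2):
--     seen = set()
--     parts = []
--     for i in str1:
--         if i not in seen:
--             seen.add(i)
--             parts.append(str(i) + ":" + str(str2.count(i)))
--     return ",".join(parts)
-- ===== Notes on version B (the rewrite author's own statement) =====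
-- stated objective: simpler
-- what changed: A precomputes a dict of counts over all of str1 and then rescans str1 popping keys to dedup while growing the result by repeated string += and finally slicing off the trailing comma; B does one pass with a seen-set, collecting each first-occurrence part in a list joined once with ','.
import Mathlib
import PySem

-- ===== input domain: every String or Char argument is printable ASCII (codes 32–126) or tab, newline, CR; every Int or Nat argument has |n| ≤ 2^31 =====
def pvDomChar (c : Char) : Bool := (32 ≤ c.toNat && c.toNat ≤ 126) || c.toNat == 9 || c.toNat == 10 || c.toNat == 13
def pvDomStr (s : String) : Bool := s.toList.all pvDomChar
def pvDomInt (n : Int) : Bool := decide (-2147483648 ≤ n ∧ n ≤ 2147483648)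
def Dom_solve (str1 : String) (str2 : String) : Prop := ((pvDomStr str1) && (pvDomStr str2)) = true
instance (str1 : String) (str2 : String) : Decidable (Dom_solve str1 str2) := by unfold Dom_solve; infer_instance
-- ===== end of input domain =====

-- B restructures A's two passes (count-dict build, then rescan with pop-based dedup and a
-- trailing-comma slice) into one pass with a seen-set collecting parts joined by ','.

-- ===== PORT A =====
-- literal port of A: first loop fills kv with str2.count(i) per char of str1; second loop,
-- guarded by 'i in kv', appends i + ":" + str(kv[i]) + "," and pops i; returns ret[0:-1].
-- (kv[i] under the 'i in kv' guard is ported as getD i 0; kv.pop(i), value discarded, as erase)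
def solve (str1 : String) (str2 : String) : String :=
  let kv : PySem.Dict Char Int :=
    str1.toList.foldl (fun d i => d.insert i ((PySem.Chars.count str2.toList [i] : Int))) PySem.Dict.empty
  let st :=
    str1.toList.foldl
      (fun (st : List Char × PySem.Dict Char Int) i =>
        if st.2.contains i then
          (st.1 ++ [i] ++ [':'] ++ PySem.Int.toChars (st.2.getD i 0) ++ [','], st.2.erase i)
        else st)
      ([], kv)
  String.ofList (PySem.List.slice st.1 (some 0) (some (-1)))

-- ===== PORT B =====
-- literal port of B: one pass over str1 with a seen set; each unseen char contributes the part
-- i + ":" + str(str2.count(i)); the parts are joined with ",".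
def solve_alt (str1 : String) (str2 : String) : String :=
  let st :=
    str1.toList.foldl
      (fun (st : PySem.Set Char × List (List Char)) i =>
        if PySem.Set.contains st.1 i then st
        else (PySem.Set.add st.1 i,
              st.2 ++ [[i] ++ [':'] ++ PySem.Int.toChars ((PySem.Chars.count str2.toList [i] : Int))]))
      (PySem.Set.empty, [])
  String.ofList (PySem.Chars.join [','] st.2)

-- ===== PRECONDITION & SPEC =====
def Spec_solve (str1 : String) (str2 : String) (out : String) : Prop := out = solve_alt str1 str2
instance (str1 : String) (str2 : String) (out : String) : Decidable (Spec_solve str1 str2 out) := by unfold Spec_solve; infer_instance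

-- ===== CLAIM (what is proved, stated in full; the proofs are below) =====
def Claim_equal_solve : Prop := ∀ (str1 : String) (str2 : String), Dom_solve str1 str2 → Spec_solve str1 str2 (solve str1 str2)

-- ===== LEMMAS AND PROOFS =====

-- lookup after the first fold: every char of l is mapped to f c
theorem get?_foldl_insertF (l : List Char) (f : Char → Int) (d : PySem.Dict Char Int) (c : Char) :
    (l.foldl (fun d i => d.insert i (f i)) d).get? c
      = if c ∈ l then some (f c) else d.get? c := by
  induction l generalizing d with
  | nil => simp
  | cons x l ih =>
    simp only [List.foldl_cons, ih, List.mem_cons]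
    by_cases hx : c = x
    · subst hx
      by_cases hc : c ∈ l <;> simp [hc, PySem.Dict.get?_insert_self]
    · by_cases hc : c ∈ l <;> simp [hc, hx, PySem.Dict.get?_insert_of_ne _ _ hx]

theorem get?_erase (d : PySem.Dict Char Int) (k c : Char) :
    (d.erase k).get? c = if c = k then none else d.get? c := by
  obtain ⟨items⟩ := d
  simp only [PySem.Dict.erase, PySem.Dict.get?]
  by_cases hck : c = k
  · subst hck
    have hfind : List.find? (fun p => p.1 == c) (items.filter (fun p => !(p.1 == c))) = none := by
      rw [List.find?_eq_none]
      intro p hp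
      simp only [List.mem_filter, Bool.not_eq_eq_eq_not, Bool.not_true] at hp
      simp [hp.2]
    simp [hfind]
  · simp only [if_neg hck]
    congr 1
    induction items with
    | nil => rfl
    | cons p rest ih =>
      by_cases hpc : p.1 = c
      · have hpk : (p.1 == k) = false := by simp [hpc, hck]
        simp only [List.filter_cons, hpk, Bool.not_false, if_true, List.find?_cons,
          show (p.1 == c) = true by simp [hpc]]
      · by_cases hpk : p.1 = k
        · simp only [List.filter_cons, show (p.1 == k) = true by simp [hpk], Bool.not_true,
            Bool.false_eq_true, if_false, List.find?_cons,
            show (p.1 == c) = false by simp [hpc], ih]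
        · simp only [List.filter_cons, show (p.1 == k) = false by simp [hpk], Bool.not_false,
            if_true, List.find?_cons, show (p.1 == c) = false by simp [hpc], ih]

-- the loop invariant: A's second loop and B's loop walk in lock-step;
-- kv answers lookups exactly on the chars not yet in B's seen set.
theorem loop_rel (str2l : List Char) (l : List Char) (kv : PySem.Dict Char Int)
    (seen : PySem.Set Char) (ret : List Char) (parts : List (List Char))
    (hkv : ∀ c ∈ l, kv.get? c
        = if PySem.Set.contains seen c then none
          else some ((PySem.Chars.count str2l [c] : Int)))
    (hret : ret = (parts.map (· ++ [','])).flatten) :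
    (l.foldl
      (fun (st : List Char × PySem.Dict Char Int) i =>
        if st.2.contains i then
          (st.1 ++ [i] ++ [':'] ++ PySem.Int.toChars (st.2.getD i 0) ++ [','], st.2.erase i)
        else st)
      (ret, kv)).1
    = ((l.foldl
      (fun (st : PySem.Set Char × List (List Char)) i =>
        if PySem.Set.contains st.1 i then st
        else (PySem.Set.add st.1 i,
              st.2 ++ [[i] ++ [':'] ++ PySem.Int.toChars ((PySem.Chars.count str2l [i] : Int))]))
      (seen, parts)).2.map (· ++ [','])).flatten := by
  induction l generalizing kv seen ret parts with
  | nil => simpa using hret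
  | cons x l ih =>
    have hx := hkv x (by simp)
    by_cases hs : x ∈ seen
    · have hsc : PySem.Set.contains seen x = true := by
        simp [PySem.Set.contains, List.contains_eq_mem, hs]
      have hnone : kv.get? x = none := by simpa [PySem.Set.contains, List.contains_eq_mem, hs] using hx
      have hcont : kv.contains x = false :=
        (PySem.Dict.get?_eq_none_iff_contains kv x).mp hnone
      simp only [List.foldl_cons, hcont, hsc, if_false, Bool.false_eq_true, if_true]
      exact ih kv seen ret parts (fun c hc => hkv c (by simp [hc])) hret
    · have hsc : PySem.Set.contains seen x = false := by
        simp [PySem.Set.contains, List.contains_eq_mem, hs]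
      have hsome : kv.get? x = some ((PySem.Chars.count str2l [x] : Int)) := by
        simpa [PySem.Set.contains, List.contains_eq_mem, hs] using hx
      have hcont : kv.contains x = true := by
        rw [PySem.Dict.contains_eq_isSome_get?, hsome]; rfl
      have hgetD : kv.getD x 0 = (PySem.Chars.count str2l [x] : Int) := by
        rw [PySem.Dict.getD_eq_get?_getD, hsome]; rfl
      simp only [List.foldl_cons, hcont, hsc, if_true, Bool.false_eq_true, if_false]
      refine ih (kv.erase x) (PySem.Set.add seen x) _ (parts ++ [_]) ?_ ?_
      · intro c hc
        rw [get?_erase]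
        by_cases hcx : c = x
        · subst hcx
          simp [PySem.Set.add, PySem.Set.contains, List.contains_eq_mem, hsc, hs]
        · have : PySem.Set.contains (PySem.Set.add seen x) c = PySem.Set.contains seen c := by
            simp [PySem.Set.add, PySem.Set.contains, List.contains_eq_mem, hs, hcx]
          rw [if_neg hcx, this]
          exact hkv c (by simp [hc])
      · simp [hret, hgetD]

-- joining with "," equals building comma-terminated chunks and dropping the last char
theorem join_eq_flatten_dropLast (parts : List (List Char)) :
    PySem.Chars.join [','] parts = ((parts.map (· ++ [','])).flatten).dropLast := by
  induction parts with
  | nil => simp [PySem.Chars.join, List.intercalate]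
  | cons p ps ih =>
    cases ps with
    | nil => simp [PySem.Chars.join, List.intercalate]
    | cons q qs =>
      have hne : ((((q :: qs).map (· ++ [','])).flatten)) ≠ [] := by
        simp
      rw [show PySem.Chars.join [','] (p :: q :: qs)
            = p ++ [','] ++ PySem.Chars.join [','] (q :: qs) by
          simp [PySem.Chars.join, List.intercalate, List.intersperse]
        , ih]
      simp only [List.map_cons, List.flatten_cons]
      have hne2 : q ++ [','] ++ ((qs.map (· ++ [','])).flatten) ≠ [] := by simp
      rw [List.dropLast_append_of_ne_nil hne2]

-- ===== VERDICT (by name: the statement is the Claim_ definition above) =====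
theorem solve_spec : Claim_equal_solve := by
  intro str1 str2 _
  show solve str1 str2 = solve_alt str1 str2
  unfold solve solve_alt
  have hkv0 : ∀ c ∈ str1.toList,
      (str1.toList.foldl
        (fun d i => d.insert i ((PySem.Chars.count str2.toList [i] : Int)))
        PySem.Dict.empty).get? c
      = if PySem.Set.contains PySem.Set.empty c then none
        else some ((PySem.Chars.count str2.toList [c] : Int)) := by
    intro c hc
    rw [get?_foldl_insertF]
    simp [hc, PySem.Set.contains, PySem.Set.empty]
  have h := loop_rel str2.toList str1.toList _ PySem.Set.empty [] [] hkv0 (by simp)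
  simp only []
  rw [h, PySem.List.slice_zero_start, PySem.List.slice_to_neg_one,
    join_eq_flatten_dropLast]
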